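-- pv_equiv track=rewrite | github.com/Sillent97/DragonbornVoiceControl | runtime/shout_recognition.py | build_shout_specific_grammar
-- ===== SOURCE A (Python) =====
-- MAX_SHOUT_WORDS = 3
--
-- MAX_VARIANTS_PER_ATOM = 12
--
-- MAX_PHRASES_PER_SHOUT = 120
--
-- def _cap_variants(variants: list[str], cap: int) -> list[str]:
--     if len(variants) <= cap:
--         return variants
--     return variants[:cap]
--
-- def _build_shout_phrases(words: list[list[str]], max_phrases: int) -> list[str]:
--     max_levels = max(1, min(MAX_SHOUT_WORDS, len(words)))
--     out: list[str] = []
--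
--     level_phrases: list[list[str]] = [[]]
--     for i in range(max_levels):
--         new_level: list[list[str]] = []
--         for prev in level_phrases:
--             for v in words[i]:
--                 p = prev + [str(v).strip()]
--                 new_level.append(p)
--                 out.append(" ".join(p))
--                 if len(out) >= max_phrases:
--                     return out[:max_phrases]
--         level_phrases = new_level
--     return out[:max_phrases]
--
-- def build_shout_specific_grammar(
--     shout_name: str,
--     atoms: dict[str, list[str]],
-- ) -> tuple[list[str], list[str]]:
--     shout_tokens = [t for t in (shout_name or "").split("_") if t][:MAX_SHOUT_WORDS]
--     words: list[list[str]] = []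
--     for tok in shout_tokens:
--         variants = (atoms or {}).get(tok)
--         if not variants:
--             return [], shout_tokens
--         words.append(_cap_variants(list(variants), MAX_VARIANTS_PER_ATOM))
--
--     grammar_list = _build_shout_phrases(words, max_phrases=MAX_PHRASES_PER_SHOUT)
--     return grammar_list, shout_tokens
-- ===== SOURCE B (Python) =====
-- MAX_SHOUT_WORDS = 3
-- MAX_VARIANTS_PER_ATOM = 12
-- MAX_PHRASES_PER_SHOUT = 120
--
--
-- def build_shout_specific_grammar(shout_name, atoms):
--     tokens = [t for t in (shout_name or "").split("_") if t][:MAX_SHOUT_WORDS]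
--     words = []
--     for tok in tokens:
--         variants = (atoms or {}).get(tok)
--         if not variants:
--             return [], tokens
--         words.append(list(variants)[:MAX_VARIANTS_PER_ATOM])
--
--     max_levels = max(1, min(MAX_SHOUT_WORDS, len(words)))
--     phrases = []
--     for length in range(1, max_levels + 1):
--         total = 1
--         for j in range(length):
--             total *= len(words[j])
--         for idx in range(total):
--             if len(phrases) >= MAX_PHRASES_PER_SHOUT:
--                 return phrases, tokens
--             parts = []
--             r = idx
--             for j in range(length - 1, -1, -1):
--                 r, k = divmod(r, len(words[j]))
--                 parts.append(str(words[j][k]).strip())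
--             parts.reverse()
--             phrases.append(" ".join(parts))
--     return phrases, tokens
-- ===== Notes on version B (the rewrite author's own statement) =====
-- stated objective: alternative
-- what changed: A grows level_phrases, a list of prefix word-lists, level by level and joins each extended prefix; B keeps no prefix state at all and, for each phrase length, decodes every phrase directly from its sequential index with divmod over the word-slot sizes (mixed-radix enumeration), with the same emission order and 120-phrase cap.
import Mathlib
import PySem

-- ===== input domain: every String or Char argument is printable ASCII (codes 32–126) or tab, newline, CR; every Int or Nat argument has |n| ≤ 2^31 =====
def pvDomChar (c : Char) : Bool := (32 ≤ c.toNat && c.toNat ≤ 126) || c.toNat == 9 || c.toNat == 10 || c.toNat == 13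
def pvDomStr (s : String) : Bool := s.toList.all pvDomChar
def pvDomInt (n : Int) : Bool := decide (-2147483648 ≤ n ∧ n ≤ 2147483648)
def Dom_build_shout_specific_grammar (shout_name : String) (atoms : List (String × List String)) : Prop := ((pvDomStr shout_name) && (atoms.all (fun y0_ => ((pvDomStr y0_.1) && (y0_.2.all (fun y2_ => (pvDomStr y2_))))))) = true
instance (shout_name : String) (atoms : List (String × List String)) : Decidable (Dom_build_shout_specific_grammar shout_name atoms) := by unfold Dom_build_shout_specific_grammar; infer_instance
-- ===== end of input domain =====

-- B replaces A's level-by-level accumulator of prefix WORD LISTS by per-length mixed-radix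
-- index decoding (each phrase is rebuilt from its index with divmod); same value, alternative algorithm.

-- ===== PORT A =====
-- _cap_variants
def pvA_capVariants (variants : List String) (cap : Nat) : List String :=
  if variants.length ≤ cap then variants else variants.take cap

-- the 'for tok in shout_tokens' loop of A, with its early 'return [], shout_tokens'
-- encoded as 'none'; the accumulated 'words' list is the extra argument.
def pvA_words (atoms : List (String × List String)) :
    List String → List (List String) → Option (List (List String))
  | [], ws => some ws
  | tok :: rest, ws =>
    match (PySem.Dict.mk atoms).get? tok with
    | none => none
    | some variants =>
      if variants = [] then none
      else pvA_words atoms rest (ws ++ [pvA_capVariants variants 12])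

-- innermost loop of _build_shout_phrases: 'for v in words[i]'; state = (new_level, out, done)
-- where 'done' encodes that the early 'return out[:max_phrases]' has fired.
def pvA_inner (wi : List String) (m : Nat) (prev : List String)
    (st : List (List String) × List String × Bool) : List (List String) × List String × Bool :=
  wi.foldl (fun st v =>
    if st.2.2 then st
    else
      let p := prev ++ [PySem.Str.strip v]
      let o := st.2.1 ++ [PySem.Str.join " " p]
      (st.1 ++ [p], o, decide (m ≤ o.length))) st

-- _build_shout_phrases
def pvA_buildPhrases (words : List (List String)) (m : Nat) : List String :=
  let maxLevels := max 1 (min 3 words.length)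
  let fin := (List.range maxLevels).foldl
    (fun (st : List (List String) × List String × Bool) i =>
      if st.2.2 then st
      else st.1.foldl (fun st2 prev => pvA_inner (words.getD i []) m prev st2) ([], st.2.1, false))
    ([[]], [], false)
  fin.2.1.take m

def build_shout_specific_grammar (shout_name : String) (atoms : List (String × List String)) : List String × List String :=
  let shout_tokens := (((PySem.Chars.splitOn shout_name.toList ['_']).map (fun cs => String.ofList cs)).filter (fun t => t ≠ "")).take 3
  match pvA_words atoms shout_tokens [] with
  | none => ([], shout_tokens)
  | some words => (pvA_buildPhrases words 120, shout_tokens)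

-- ===== PORT B =====
-- the 'for tok in tokens' loop of B (early 'return [], tokens' = none), structural recursion
def pvB_words (atoms : List (String × List String)) : List String → Option (List (List String))
  | [] => some []
  | tok :: rest =>
    match (PySem.Dict.mk atoms).get? tok with
    | none => none
    | some variants =>
      if variants = [] then none
      else (pvB_words atoms rest).map (fun ws => variants.take 12 :: ws)

-- the 'for j in range(length-1, -1, -1)' divmod loop: decode idx into its parts list
def pvB_decode (words : List (List String)) (len_ : Nat) (idx : Nat) : List String :=
  let st := ((List.range len_).reverse).foldl
    (fun (st : Nat × List String) j =>
      let n := (words.getD j []).length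
      (st.1 / n, st.2 ++ [PySem.Str.strip ((words.getD j []).getD (st.1 % n) "")]))
    (idx, [])
  st.2.reverse

-- the per-length loops of B; state = (phrases, done) with 'done' = the early return fired
def pvB_phrases (words : List (List String)) (m : Nat) : List String :=
  let maxLevels := max 1 (min 3 words.length)
  let fin := (List.range maxLevels).foldl
    (fun (st : List String × Bool) i =>
      if st.2 then st
      else
        let len_ := i + 1
        let total := (List.range len_).foldl (fun t j => t * (words.getD j []).length) 1
        (List.range total).foldl
          (fun (st2 : List String × Bool) idx =>
            if st2.2 then st2
            else if m ≤ st2.1.length then (st2.1, true)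
            else (st2.1 ++ [PySem.Str.join " " (pvB_decode words len_ idx)], false))
          st)
    ([], false)
  fin.1

def build_shout_specific_grammar_alt (shout_name : String) (atoms : List (String × List String)) : List String × List String :=
  let tokens := (((PySem.Chars.splitOn shout_name.toList ['_']).map (fun cs => String.ofList cs)).filter (fun t => t ≠ "")).take 3
  match pvB_words atoms tokens with
  | none => ([], tokens)
  | some words => (pvB_phrases words 120, tokens)

-- ===== PRECONDITION & SPEC =====
-- Pre_ excludes only shout names with no "_"-separated token (empty / all-underscore names):
-- there Python A indexes words[0] of an empty list and raises IndexError (B raises too).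
def Pre_build_shout_specific_grammar (shout_name : String) (_atoms : List (String × List String)) : Prop :=
  (((PySem.Chars.splitOn shout_name.toList ['_']).map (fun cs => String.ofList cs)).filter (fun t => t ≠ "")) ≠ []
instance (shout_name : String) (atoms : List (String × List String)) : Decidable (Pre_build_shout_specific_grammar shout_name atoms) := by unfold Pre_build_shout_specific_grammar; infer_instance

def pvWitness_build_shout_specific_grammar : String × (List (String × List String)) :=
  ("fus_ro", [("fus", ["fus", " force "]), ("ro", ["ro"])])

def Spec_build_shout_specific_grammar (shout_name : String) (atoms : List (String × List String)) (out : List String × List String) : Prop := out = build_shout_specific_grammar_alt shout_name atoms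
instance (shout_name : String) (atoms : List (String × List String)) (out : List String × List String) : Decidable (Spec_build_shout_specific_grammar shout_name atoms out) := by unfold Spec_build_shout_specific_grammar; infer_instance

-- ===== CLAIM (what is proved, stated in full; the proofs are below) =====
def Claim_equal_build_shout_specific_grammar : Prop := ∀ (shout_name : String) (atoms : List (String × List String)), Dom_build_shout_specific_grammar shout_name atoms → Pre_build_shout_specific_grammar shout_name atoms → Spec_build_shout_specific_grammar shout_name atoms (build_shout_specific_grammar shout_name atoms)

-- ===== LEMMAS AND PROOFS =====

theorem pv_words_eq (atoms : List (String × List String)) :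
    ∀ (ts : List String) (acc : List (List String)),
      pvA_words atoms ts acc = (pvB_words atoms ts).map (fun ws => acc ++ ws) := by
  intro ts
  induction ts with
  | nil => intro acc; simp [pvA_words, pvB_words]
  | cons tok rest ih =>
    intro acc
    simp only [pvA_words, pvB_words]
    cases h : (PySem.Dict.mk atoms).get? tok with
    | none => simp
    | some variants =>
      simp only
      by_cases hv : variants = []
      · simp [hv]
      · simp only [if_neg hv]
        rw [ih]
        cases pvB_words atoms rest with
        | none => simp
        | some ws =>
          have hcap : pvA_capVariants variants 12 = variants.take 12 := by
            unfold pvA_capVariants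
            split
            · rename_i hle
              exact (List.take_of_length_le hle).symm
            · rfl
          simp [hcap]

theorem pv_words_shape (atoms : List (String × List String)) :
    ∀ (ts : List String) (ws : List (List String)),
      pvB_words atoms ts = some ws → ws.length = ts.length ∧ ∀ w ∈ ws, w ≠ [] := by
  intro ts
  induction ts with
  | nil => intro ws h; simp [pvB_words] at h; subst h; simp
  | cons tok rest ih =>
    intro ws h
    simp only [pvB_words] at h
    cases hg : (PySem.Dict.mk atoms).get? tok with
    | none => rw [hg] at h; simp at h
    | some variants =>
      rw [hg] at h
      simp only at h
      by_cases hv : variants = []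
      · simp [hv] at h
      · rw [if_neg hv] at h
        cases hb : pvB_words atoms rest with
        | none => rw [hb] at h; simp at h
        | some ws' =>
          rw [hb] at h
          simp at h
          obtain ⟨h1, h2⟩ := ih ws' hb
          subst h
          refine ⟨by simp [h1], ?_⟩
          intro w hw
          rcases List.mem_cons.mp hw with h | h
          · subst h
            intro hnil
            have hlen0 : (variants.take 12).length = 0 := by rw [hnil]; rfl
            rw [List.length_take] at hlen0
            have hv' : variants.length ≠ 0 := fun h0 => hv (List.length_eq_zero_iff.mp h0)
            omega
          · exact h2 w h

-- ---- the phrase sequence both programs enumerate ----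

def pvLvl (ws : List (List String)) : Nat → List (List String)
  | 0 => [[]]
  | i + 1 => (pvLvl ws i).flatMap (fun p => (ws.getD i []).map (fun v => p ++ [PySem.Str.strip v]))

def pvSeg (ws : List (List String)) (i k : Nat) : List String :=
  (List.range' i k).flatMap (fun j => (pvLvl ws (j + 1)).map (PySem.Str.join " "))

theorem pv_take_append_take {α : Type} (a b : List α) (m : Nat) :
    ((a.take m) ++ b).take m = (a ++ b).take m := by
  by_cases h : m ≤ a.length
  · rw [List.take_append_of_le_length (l₁ := a) h,
        List.take_append_of_le_length (l₁ := a.take m) (by simp [h]), List.take_take]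
    simp
  · have ha : a.take m = a := List.take_of_length_le (by omega)
    rw [ha]

-- ---- A side ----

theorem pvA_inner_done (wi : List String) (m : Nat) (prev : List String)
    (nl : List (List String)) (out : List String) :
    pvA_inner wi m prev (nl, out, true) = (nl, out, true) := by
  unfold pvA_inner
  induction wi with
  | nil => rfl
  | cons v rest ih => simpa using ih

theorem pvA_inner_spec (m : Nat) (prev : List String) :
    ∀ (wi : List String) (nl : List (List String)) (out : List String),
      out.length ≤ m →
      (pvA_inner wi m prev (nl, out, decide (m ≤ out.length))).2.1
          = (out ++ wi.map (fun v => PySem.Str.join " " (prev ++ [PySem.Str.strip v]))).take m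
      ∧ (pvA_inner wi m prev (nl, out, decide (m ≤ out.length))).2.2
          = decide (m ≤ out.length + wi.length)
      ∧ ((pvA_inner wi m prev (nl, out, decide (m ≤ out.length))).2.2 = false →
          (pvA_inner wi m prev (nl, out, decide (m ≤ out.length))).1
            = nl ++ wi.map (fun v => prev ++ [PySem.Str.strip v])) := by
  intro wi
  induction wi with
  | nil =>
    intro nl out h
    have htk : out.take m = out := List.take_of_length_le h
    refine ⟨by simpa [pvA_inner] using htk.symm, by simp [pvA_inner], by intro _; simp [pvA_inner]⟩
  | cons v rest ih =>
    intro nl out h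
    by_cases hm : m ≤ out.length
    · -- done already: out.length = m
      have hlen : out.length = m := le_antisymm h hm
      rw [show (decide (m ≤ out.length)) = true by simp [hm]]
      rw [pvA_inner_done]
      refine ⟨?_, ?_, ?_⟩
      · rw [List.take_append_of_le_length (by omega), List.take_of_length_le (by omega)]
      · simp; omega
      · intro hfalse; simp at hfalse
    · -- not done yet: one step, then ih
      have hstep : pvA_inner (v :: rest) m prev (nl, out, decide (m ≤ out.length))
          = pvA_inner rest m prev
              (nl ++ [prev ++ [PySem.Str.strip v]],
               out ++ [PySem.Str.join " " (prev ++ [PySem.Str.strip v])],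
               decide (m ≤ (out ++ [PySem.Str.join " " (prev ++ [PySem.Str.strip v])]).length)) := by
        simp [pvA_inner, hm]
      rw [hstep]
      set o' := out ++ [PySem.Str.join " " (prev ++ [PySem.Str.strip v])] with ho'
      have hlen' : o'.length = out.length + 1 := by simp [ho']
      have h' : o'.length ≤ m := by omega
      obtain ⟨e1, e2, e3⟩ := ih (nl ++ [prev ++ [PySem.Str.strip v]]) o' h'
      refine ⟨?_, ?_, ?_⟩
      · rw [e1]; simp [ho']
      · rw [e2]; simp [hlen']; constructor <;> (intro; omega)
      · intro hfalse
        rw [e3 hfalse]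
        simp

theorem pvA_level_spec (m : Nat) (wi : List String) :
    ∀ (lp : List (List String)) (nl : List (List String)) (out : List String),
      out.length ≤ m →
      (lp.foldl (fun st2 prev => pvA_inner wi m prev st2) (nl, out, decide (m ≤ out.length))).2.1
          = (out ++ lp.flatMap (fun prev => wi.map (fun v => PySem.Str.join " " (prev ++ [PySem.Str.strip v])))).take m
      ∧ (lp.foldl (fun st2 prev => pvA_inner wi m prev st2) (nl, out, decide (m ≤ out.length))).2.2
          = decide (m ≤ out.length + (lp.flatMap (fun prev => wi.map (fun v => PySem.Str.join " " (prev ++ [PySem.Str.strip v])))).length)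
      ∧ ((lp.foldl (fun st2 prev => pvA_inner wi m prev st2) (nl, out, decide (m ≤ out.length))).2.2 = false →
          (lp.foldl (fun st2 prev => pvA_inner wi m prev st2) (nl, out, decide (m ≤ out.length))).1
            = nl ++ lp.flatMap (fun prev => wi.map (fun v => prev ++ [PySem.Str.strip v]))) := by
  intro lp
  induction lp with
  | nil =>
    intro nl out h
    refine ⟨by simp [List.take_of_length_le h], by simp, by intro _; simp⟩
  | cons prev rest ih =>
    intro nl out h
    simp only [List.foldl_cons, List.flatMap_cons]
    obtain ⟨e1, e2, e3⟩ := pvA_inner_spec m prev wi nl out h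
    have hshape : pvA_inner wi m prev (nl, out, decide (m ≤ out.length))
        = ((pvA_inner wi m prev (nl, out, decide (m ≤ out.length))).1,
           (out ++ wi.map (fun v => PySem.Str.join " " (prev ++ [PySem.Str.strip v]))).take m,
           decide (m ≤ ((out ++ wi.map (fun v => PySem.Str.join " " (prev ++ [PySem.Str.strip v]))).take m).length)) := by
      have : decide (m ≤ out.length + wi.length)
          = decide (m ≤ ((out ++ wi.map (fun v => PySem.Str.join " " (prev ++ [PySem.Str.strip v]))).take m).length) := by
        simp only [decide_eq_decide, List.length_take, List.length_append, List.length_map]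
        omega
      rw [← this, ← e2, ← e1]
    rw [hshape]
    set O := out ++ wi.map (fun v => PySem.Str.join " " (prev ++ [PySem.Str.strip v])) with hO
    have hOle : (O.take m).length ≤ m := by simp
    obtain ⟨f1, f2, f3⟩ := ih (pvA_inner wi m prev (nl, out, decide (m ≤ out.length))).1 (O.take m) hOle
    refine ⟨?_, ?_, ?_⟩
    · rw [f1, pv_take_append_take, ← List.append_assoc]
    · have hOlen : O.length = out.length + wi.length := by simp [hO]
      rw [f2]
      simp only [decide_eq_decide, List.length_take, List.length_append, List.length_map, hOlen]
      omega
    · intro hfalse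
      have h2f : decide (m ≤ (O.take m).length + (rest.flatMap (fun prev => wi.map (fun v => PySem.Str.join " " (prev ++ [PySem.Str.strip v])))).length) = false := by
        rw [← f2]; exact hfalse
      rw [List.length_take] at h2f
      simp only [decide_eq_false_iff_not, not_le] at h2f
      have hOlen : O.length = out.length + wi.length := by simp [hO]
      have hOlt : O.length < m := by omega
      have hwiDone : (pvA_inner wi m prev (nl, out, decide (m ≤ out.length))).2.2 = false := by
        rw [e2]
        simp only [decide_eq_false_iff_not, not_le]
        omega
      rw [f3 hfalse, e3 hwiDone]
      simp

theorem pvA_outer_spec (ws : List (List String)) (m : Nat) (_hm : 0 < m) :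
    ∀ (k i : Nat) (lp : List (List String)) (out : List String),
      out.length ≤ m →
      (decide (m ≤ out.length) = false → lp = pvLvl ws i) →
      ((List.range' i k).foldl
        (fun (st : List (List String) × List String × Bool) j =>
          if st.2.2 then st
          else st.1.foldl (fun st2 prev => pvA_inner (ws.getD j []) m prev st2) ([], st.2.1, false)) (lp, out, decide (m ≤ out.length))).2.1
        = (out ++ pvSeg ws i k).take m := by
  intro k
  induction k with
  | zero =>
    intro i lp out h _
    simp [pvSeg, List.take_of_length_le h]
  | succ k ih =>
    intro i lp out h hlp
    rw [List.range'_succ, List.foldl_cons]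
    by_cases hm2 : m ≤ out.length
    · -- done: nothing changes
      rw [show decide (m ≤ out.length) = true by simp [hm2]]
      simp only [if_pos]
      have : ((List.range' (i+1) k).foldl
          (fun (st : List (List String) × List String × Bool) j =>
            if st.2.2 then st
            else st.1.foldl (fun st2 prev => pvA_inner (ws.getD j []) m prev st2) ([], st.2.1, false)) (lp, out, true)) = (lp, out, true) := by
        induction (List.range' (i+1) k) with
        | nil => rfl
        | cons a t iht => simpa using iht
      rw [this]
      have hlen : out.length = m := le_antisymm h hm2
      rw [List.take_append_of_le_length (by omega), List.take_of_length_le (by omega)]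
    · rw [show decide (m ≤ out.length) = false by simp [hm2]]
      simp only [if_neg Bool.false_ne_true]
      rw [hlp (by simp [hm2])]
      have hfalse0 : (false : Bool) = decide (m ≤ out.length) := by simp [hm2]
      rw [show (([] : List (List String)), out, false) = (([] : List (List String)), out, decide (m ≤ out.length)) by rw [← hfalse0]]
      obtain ⟨e1, e2, e3⟩ := pvA_level_spec m (ws.getD i []) (pvLvl ws i) [] out (le_of_lt (by omega))
      set L := (pvLvl ws i).flatMap (fun prev => (ws.getD i []).map (fun v => PySem.Str.join " " (prev ++ [PySem.Str.strip v]))) with hL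
      have hLeqLvl : L = (pvLvl ws (i+1)).map (PySem.Str.join " ") := by
        simp [hL, pvLvl, List.map_flatMap, List.map_map, Function.comp_def]
      have hshape : ((pvLvl ws i).foldl (fun st2 prev => pvA_inner (ws.getD i []) m prev st2) ([], out, decide (m ≤ out.length)))
          = (((pvLvl ws i).foldl (fun st2 prev => pvA_inner (ws.getD i []) m prev st2) ([], out, decide (m ≤ out.length))).1,
             (out ++ L).take m,
             decide (m ≤ ((out ++ L).take m).length)) := by
        have hd : decide (m ≤ out.length + L.length)
            = decide (m ≤ ((out ++ L).take m).length) := by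
          simp only [decide_eq_decide, List.length_take, List.length_append]
          omega
        rw [← hd, ← e2, ← e1]
      rw [hshape]
      have hnext : decide (m ≤ ((out ++ L).take m).length) = false →
          ((pvLvl ws i).foldl (fun st2 prev => pvA_inner (ws.getD i []) m prev st2) ([], out, decide (m ≤ out.length))).1 = pvLvl ws (i+1) := by
        intro hf
        have : ((pvLvl ws i).foldl (fun st2 prev => pvA_inner (ws.getD i []) m prev st2) ([], out, decide (m ≤ out.length))).2.2 = false := by
          rw [e2]
          simp at hf ⊢
          omega
        rw [e3 this]
        simp [pvLvl]
      rw [ih (i+1) _ ((out ++ L).take m) (by simp) hnext]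
      rw [pv_take_append_take]
      have : pvSeg ws i (k+1) = L ++ pvSeg ws (i+1) k := by
        simp [pvSeg, List.range'_succ, hLeqLvl]
      rw [this, ← List.append_assoc]

-- ---- B side ----

def pvProdN (ws : List (List String)) : Nat → Nat
  | 0 => 1
  | ℓ + 1 => pvProdN ws ℓ * (ws.getD ℓ []).length

theorem pv_total_eq (ws : List (List String)) (ℓ : Nat) :
    (List.range ℓ).foldl (fun t j => t * (ws.getD j []).length) 1 = pvProdN ws ℓ := by
  induction ℓ with
  | zero => rfl
  | succ n ih => rw [List.range_succ, List.foldl_append, ih]; rfl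

theorem pvB_decode_aux (ws : List (List String)) :
    ∀ (js : List Nat) (r : Nat) (acc : List String),
      js.foldl (fun (st : Nat × List String) j =>
          (st.1 / (ws.getD j []).length,
           st.2 ++ [PySem.Str.strip ((ws.getD j []).getD (st.1 % (ws.getD j []).length) "")])) (r, acc)
      = ((js.foldl (fun (st : Nat × List String) j =>
          (st.1 / (ws.getD j []).length,
           st.2 ++ [PySem.Str.strip ((ws.getD j []).getD (st.1 % (ws.getD j []).length) "")])) (r, [])).1,
         acc ++ (js.foldl (fun (st : Nat × List String) j =>
          (st.1 / (ws.getD j []).length,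
           st.2 ++ [PySem.Str.strip ((ws.getD j []).getD (st.1 % (ws.getD j []).length) "")])) (r, [])).2) := by
  intro js
  induction js with
  | nil => intro r acc; simp
  | cons j t ih =>
    intro r acc
    simp only [List.foldl_cons]
    rw [ih _ (acc ++ _), ih _ ([] ++ _)]
    simp

theorem pvB_decode_succ (ws : List (List String)) (ℓ idx : Nat) :
    pvB_decode ws (ℓ + 1) idx
      = pvB_decode ws ℓ (idx / (ws.getD ℓ []).length)
        ++ [PySem.Str.strip ((ws.getD ℓ []).getD (idx % (ws.getD ℓ []).length) "")] := by
  unfold pvB_decode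
  rw [List.range_succ]
  simp only [List.reverse_append, List.reverse_cons, List.reverse_nil, List.nil_append,
    List.cons_append, List.foldl_cons]
  rw [pvB_decode_aux]
  simp

theorem pv_map_getD_range {α : Type} (xs : List α) (d : α) :
    (List.range xs.length).map (fun k => xs.getD k d) = xs := by
  apply List.ext_getElem
  · simp
  · intro i h1 h2
    simp [List.getD_eq_getElem?_getD, List.getElem?_eq_getElem h2]

theorem pv_range_mul {α : Type} (P n : Nat) (f : Nat → α) :
    (List.range (P * n)).map f
      = (List.range P).flatMap (fun q => (List.range n).map (fun k => f (q * n + k))) := by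
  induction P with
  | zero => simp
  | succ P ih =>
    rw [Nat.succ_mul, List.range_add, List.map_append, ih, List.range_succ, List.flatMap_append]
    simp [List.map_map, Function.comp_def]

theorem pvB_decode_enum (ws : List (List String)) :
    ∀ (ℓ : Nat), (∀ j, j < ℓ → (ws.getD j []).length ≠ 0) →
      (List.range (pvProdN ws ℓ)).map (pvB_decode ws ℓ) = pvLvl ws ℓ := by
  intro ℓ
  induction ℓ with
  | zero =>
    intro _
    simp [pvProdN, pvLvl, List.range_succ]
    rfl
  | succ ℓ ih =>
    intro hpos
    have hn : (ws.getD ℓ []).length ≠ 0 := hpos ℓ (by omega)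
    rw [show pvProdN ws (ℓ+1) = pvProdN ws ℓ * (ws.getD ℓ []).length from rfl]
    rw [pv_range_mul]
    have hstep : ∀ q k, k < (ws.getD ℓ []).length →
        pvB_decode ws (ℓ+1) (q * (ws.getD ℓ []).length + k)
          = pvB_decode ws ℓ q ++ [PySem.Str.strip ((ws.getD ℓ []).getD k "")] := by
      intro q k hk
      rw [pvB_decode_succ]
      congr 2
      · rw [Nat.mul_comm q, Nat.mul_add_div (by omega), Nat.div_eq_of_lt hk]
        omega
      · rw [Nat.mul_comm q, Nat.mul_add_mod, Nat.mod_eq_of_lt hk]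
    have hinner : ∀ q, (List.range (ws.getD ℓ []).length).map
          (fun k => pvB_decode ws (ℓ+1) (q * (ws.getD ℓ []).length + k))
        = (ws.getD ℓ []).map (fun v => pvB_decode ws ℓ q ++ [PySem.Str.strip v]) := by
      intro q
      have : (List.range (ws.getD ℓ []).length).map
          (fun k => pvB_decode ws (ℓ+1) (q * (ws.getD ℓ []).length + k))
          = (List.range (ws.getD ℓ []).length).map
          (fun k => pvB_decode ws ℓ q ++ [PySem.Str.strip ((ws.getD ℓ []).getD k "")]) := by
        apply List.map_congr_left
        intro k hk
        exact hstep q k (List.mem_range.mp hk)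
      rw [this]
      rw [show (fun k => pvB_decode ws ℓ q ++ [PySem.Str.strip ((ws.getD ℓ []).getD k "")])
            = (fun v => pvB_decode ws ℓ q ++ [PySem.Str.strip v]) ∘ (fun k => (ws.getD ℓ []).getD k "") from rfl]
      rw [← List.map_map, pv_map_getD_range]
    have hIH := ih (fun j hj => hpos j (by omega))
    calc (List.range (pvProdN ws ℓ)).flatMap
          (fun q => (List.range (ws.getD ℓ []).length).map (fun k => pvB_decode ws (ℓ+1) (q * (ws.getD ℓ []).length + k)))
        = (List.range (pvProdN ws ℓ)).flatMap
          (fun q => (ws.getD ℓ []).map (fun v => pvB_decode ws ℓ q ++ [PySem.Str.strip v])) := by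
          apply List.flatMap_congr
          intro q _
          exact hinner q
      _ = ((List.range (pvProdN ws ℓ)).map (pvB_decode ws ℓ)).flatMap
          (fun p => (ws.getD ℓ []).map (fun v => p ++ [PySem.Str.strip v])) := by
          rw [List.flatMap_map]
      _ = pvLvl ws (ℓ+1) := by rw [hIH]; rfl

theorem pvB_inner_spec (ws : List (List String)) (m : Nat) (len_ : Nat) :
    ∀ (N : Nat) (phr : List String) (d : Bool),
      phr.length ≤ m → (d = true → m ≤ phr.length) →
      ((List.range N).foldl
        (fun (st2 : List String × Bool) idx =>
          if st2.2 then st2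
          else if m ≤ st2.1.length then (st2.1, true)
          else (st2.1 ++ [PySem.Str.join " " (pvB_decode ws len_ idx)], false)) (phr, d)).1
        = (phr ++ (List.range N).map (fun idx => PySem.Str.join " " (pvB_decode ws len_ idx))).take m
      ∧ ((List.range N).foldl
        (fun (st2 : List String × Bool) idx =>
          if st2.2 then st2
          else if m ≤ st2.1.length then (st2.1, true)
          else (st2.1 ++ [PySem.Str.join " " (pvB_decode ws len_ idx)], false)) (phr, d)).1.length ≤ m
      ∧ (((List.range N).foldl
        (fun (st2 : List String × Bool) idx =>
          if st2.2 then st2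
          else if m ≤ st2.1.length then (st2.1, true)
          else (st2.1 ++ [PySem.Str.join " " (pvB_decode ws len_ idx)], false)) (phr, d)).2 = true →
          m ≤ ((List.range N).foldl
        (fun (st2 : List String × Bool) idx =>
          if st2.2 then st2
          else if m ≤ st2.1.length then (st2.1, true)
          else (st2.1 ++ [PySem.Str.join " " (pvB_decode ws len_ idx)], false)) (phr, d)).1.length) := by
  intro N
  induction N with
  | zero =>
    intro phr d h hd
    exact ⟨by simp [List.take_of_length_le h], h, hd⟩
  | succ N ih =>
    intro phr d h hd
    rw [List.range_succ, List.foldl_append, List.foldl_cons, List.foldl_nil]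
    obtain ⟨e1, e2, e3⟩ := ih phr d h hd
    set F := fun idx => PySem.Str.join " " (pvB_decode ws len_ idx) with hF
    set r := ((List.range N).foldl
        (fun (st2 : List String × Bool) idx =>
          if st2.2 then st2
          else if m ≤ st2.1.length then (st2.1, true)
          else (st2.1 ++ [F idx], false)) (phr, d)) with hr
    by_cases hdone : r.2 = true
    · have hrm : r.1.length = m := le_antisymm e2 (e3 hdone)
      have hstep : (if r.2 = true then r else if m ≤ r.1.length then (r.1, true) else (r.1 ++ [F N], false)) = r := by
        rw [hdone]; simp
      rw [hstep]
      refine ⟨?_, e2, e3⟩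
      rw [List.map_append, ← List.append_assoc, ← pv_take_append_take, ← e1,
          List.take_append_of_le_length (by omega), List.take_of_length_le (by omega), e1]
    · have hdf : r.2 = false := by simpa using hdone
      by_cases hcap : m ≤ r.1.length
      · have hrm : r.1.length = m := le_antisymm e2 hcap
        have hstep : (if r.2 = true then r else if m ≤ r.1.length then (r.1, true) else (r.1 ++ [F N], false)) = (r.1, true) := by
          rw [hdf]; simp [hcap]
        rw [hstep]
        refine ⟨?_, e2, fun _ => hcap⟩
        show r.1 = (phr ++ (List.range N ++ [N]).map F).take m
        rw [List.map_append, ← List.append_assoc, ← pv_take_append_take, ← e1,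
            List.take_append_of_le_length (by omega), List.take_of_length_le (by omega)]
      · have hstep : (if r.2 = true then r else if m ≤ r.1.length then (r.1, true) else (r.1 ++ [F N], false)) = (r.1 ++ [F N], false) := by
          rw [hdf]; simp [hcap]
        rw [hstep]
        have hfullval : r.1 = phr ++ (List.range N).map F := by
          rw [e1]
          apply List.take_of_length_le
          by_contra hc
          rw [not_le] at hc
          have h2 : (List.take m (phr ++ (List.range N).map F)).length
              = min m ((phr ++ (List.range N).map F)).length := List.length_take
          rw [← e1] at h2
          omega
        refine ⟨?_, by simp; omega, by simp⟩
        show r.1 ++ [F N] = (phr ++ (List.range N ++ [N]).map F).take m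
        rw [List.map_append, ← List.append_assoc, ← hfullval,
            List.take_of_length_le (by simp; omega)]
        simp

theorem pvB_outer_spec (ws : List (List String)) (m : Nat) (L : Nat)
    (_hL : L ≤ ws.length) (hpos : ∀ j, j < L → (ws.getD j []).length ≠ 0) :
    ∀ (k i : Nat), i + k ≤ L → ∀ (phr : List String) (d : Bool),
      phr.length ≤ m → (d = true → m ≤ phr.length) →
      ((List.range' i k).foldl
        (fun (st : List String × Bool) j =>
          if st.2 then st
          else
            (List.range ((List.range (j+1)).foldl (fun t j' => t * (ws.getD j' []).length) 1)).foldl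
              (fun (st2 : List String × Bool) idx =>
                if st2.2 then st2
                else if m ≤ st2.1.length then (st2.1, true)
                else (st2.1 ++ [PySem.Str.join " " (pvB_decode ws (j+1) idx)], false))
              st) (phr, d)).1
        = (phr ++ pvSeg ws i k).take m := by
  intro k
  induction k with
  | zero =>
    intro i _ phr d h _
    simp [pvSeg, List.take_of_length_le h]
  | succ k ih =>
    intro i hik phr d h hd
    rw [List.range'_succ, List.foldl_cons]
    by_cases hdb : d = true
    · have hm : phr.length = m := le_antisymm h (hd hdb)
      rw [hdb]
      simp only [if_pos]
      rw [ih (i+1) (by omega) phr true h (fun _ => by omega)]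
      rw [List.take_append_of_le_length (by omega), List.take_of_length_le (by omega),
          List.take_append_of_le_length (by omega), List.take_of_length_le (by omega)]
    · rw [show d = false by simpa using hdb]
      simp only [Bool.false_eq_true, if_false]
      obtain ⟨e1, e2, e3⟩ := pvB_inner_spec ws m (i+1)
        ((List.range (i+1)).foldl (fun t j' => t * (ws.getD j' []).length) 1) phr false h (by simp)
      set r := ((List.range ((List.range (i+1)).foldl (fun t j' => t * (ws.getD j' []).length) 1)).foldl
          (fun (st2 : List String × Bool) idx =>
            if st2.2 then st2
            else if m ≤ st2.1.length then (st2.1, true)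
            else (st2.1 ++ [PySem.Str.join " " (pvB_decode ws (i+1) idx)], false)) (phr, false)) with hr
    -- rewrite the inner result through the enumeration lemma
      have henum : (List.range ((List.range (i+1)).foldl (fun t j' => t * (ws.getD j' []).length) 1)).map
            (fun idx => PySem.Str.join " " (pvB_decode ws (i+1) idx))
          = (pvLvl ws (i+1)).map (PySem.Str.join " ") := by
        rw [pv_total_eq]
        rw [show (fun idx => PySem.Str.join " " (pvB_decode ws (i+1) idx))
              = (PySem.Str.join " ") ∘ (pvB_decode ws (i+1)) from rfl]
        rw [← List.map_map]
        rw [pvB_decode_enum ws (i+1) (fun j hj => hpos j (by omega))]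
      have hshape : r = (r.1, r.2) := rfl
      have hrst : ((List.range' (i+1) k).foldl
          (fun (st : List String × Bool) j =>
            if st.2 then st
            else
              (List.range ((List.range (j+1)).foldl (fun t j' => t * (ws.getD j' []).length) 1)).foldl
                (fun (st2 : List String × Bool) idx =>
                  if st2.2 then st2
                  else if m ≤ st2.1.length then (st2.1, true)
                  else (st2.1 ++ [PySem.Str.join " " (pvB_decode ws (j+1) idx)], false))
                st) r).1 = (r.1 ++ pvSeg ws (i+1) k).take m := by
        rw [hshape]
        exact ih (i+1) (by omega) r.1 r.2 e2 e3
      rw [hrst, e1, henum]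
      rw [pv_take_append_take]
      have : pvSeg ws i (k+1) = (pvLvl ws (i+1)).map (PySem.Str.join " ") ++ pvSeg ws (i+1) k := by
        simp [pvSeg, List.range'_succ]
      rw [this, ← List.append_assoc]

-- ---- put it together ----

theorem pv_phrases_eq (ws : List (List String)) (hlen1 : 1 ≤ ws.length) (hlen3 : ws.length ≤ 3)
    (hne : ∀ w ∈ ws, w ≠ []) :
    pvA_buildPhrases ws 120 = pvB_phrases ws 120 := by
  have hML : max 1 (min 3 ws.length) = ws.length := by omega
  have hpos : ∀ j, j < ws.length → (ws.getD j []).length ≠ 0 := by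
    intro j hj
    have : ws.getD j [] ∈ ws := by
      rw [List.getD_eq_getElem?_getD, List.getElem?_eq_getElem hj]
      exact List.getElem_mem hj
    intro h0
    exact hne _ this (List.length_eq_zero_iff.mp h0)
  have hA : (((List.range' 0 ws.length).foldl
        (fun (st : List (List String) × List String × Bool) j =>
          if st.2.2 then st
          else st.1.foldl (fun st2 prev => pvA_inner (ws.getD j []) 120 prev st2) ([], st.2.1, false))
        ([[]], [], false)).2.1)
      = (([] : List String) ++ pvSeg ws 0 ws.length).take 120 :=
    pvA_outer_spec ws 120 (by omega) ws.length 0 [[]] [] (by simp) (fun _ => by simp [pvLvl])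
  have hB : (((List.range' 0 ws.length).foldl
        (fun (st : List String × Bool) j =>
          if st.2 then st
          else
            (List.range ((List.range (j+1)).foldl (fun t j' => t * (ws.getD j' []).length) 1)).foldl
              (fun (st2 : List String × Bool) idx =>
                if st2.2 then st2
                else if 120 ≤ st2.1.length then (st2.1, true)
                else (st2.1 ++ [PySem.Str.join " " (pvB_decode ws (j+1) idx)], false))
              st)
        ([], false)).1)
      = (([] : List String) ++ pvSeg ws 0 ws.length).take 120 :=
    pvB_outer_spec ws 120 ws.length (le_refl _) hpos ws.length 0 (by omega) [] false (by simp) (by simp)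
  show (((List.range (max 1 (min 3 ws.length))).foldl
        (fun (st : List (List String) × List String × Bool) i =>
          if st.2.2 then st
          else st.1.foldl (fun st2 prev => pvA_inner (ws.getD i []) 120 prev st2) ([], st.2.1, false))
        ([[]], [], false)).2.1).take 120
      = ((List.range (max 1 (min 3 ws.length))).foldl
        (fun (st : List String × Bool) i =>
          if st.2 then st
          else
            (List.range ((List.range (i+1)).foldl (fun t j => t * (ws.getD j []).length) 1)).foldl
              (fun (st2 : List String × Bool) idx =>
                if st2.2 then st2
                else if 120 ≤ st2.1.length then (st2.1, true)
                else (st2.1 ++ [PySem.Str.join " " (pvB_decode ws (i+1) idx)], false))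
              st)
        ([], false)).1
  rw [hML, List.range_eq_range', hA, hB, List.take_take]
  simp

theorem build_shout_specific_grammar_spec_aux :
    ∀ (shout_name : String) (atoms : List (String × List String)),
      Pre_build_shout_specific_grammar shout_name atoms →
      build_shout_specific_grammar shout_name atoms = build_shout_specific_grammar_alt shout_name atoms := by
  intro shout_name atoms hpre
  unfold build_shout_specific_grammar build_shout_specific_grammar_alt
  set tokens := (((PySem.Chars.splitOn shout_name.toList ['_']).map (fun cs => String.ofList cs)).filter (fun t => t ≠ "")).take 3 with htok
  show (match pvA_words atoms tokens [] with
    | none => ([], tokens)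
    | some words => (pvA_buildPhrases words 120, tokens))
    = (match pvB_words atoms tokens with
    | none => ([], tokens)
    | some words => (pvB_phrases words 120, tokens))
  have hA := pv_words_eq atoms tokens []
  cases hB : pvB_words atoms tokens with
  | none =>
    rw [hB] at hA
    simp only [Option.map_none] at hA
    rw [hA]
  | some ws =>
    rw [hB] at hA
    simp only [Option.map_some, List.nil_append] at hA
    rw [hA]
    simp only
    obtain ⟨hlen, hne⟩ := pv_words_shape atoms tokens ws hB
    have htoklen1 : 1 ≤ tokens.length := by
      have hnil : ((PySem.Chars.splitOn shout_name.toList ['_']).map (fun cs => String.ofList cs)).filter (fun t => t ≠ "") ≠ [] := hpre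
      have h0 : (((PySem.Chars.splitOn shout_name.toList ['_']).map (fun cs => String.ofList cs)).filter (fun t => t ≠ "")).length ≠ 0 :=
        fun hc => hnil (List.length_eq_zero_iff.mp hc)
      rw [htok, List.length_take]
      omega
    have htoklen3 : tokens.length ≤ 3 := by rw [htok]; simp [List.length_take]
    rw [pv_phrases_eq ws (by omega) (by omega) hne]

-- ===== VERDICT (by name: the statement is the Claim_ definition above) =====
theorem build_shout_specific_grammar_spec : Claim_equal_build_shout_specific_grammar := by
  intro shout_name atoms _ hpre
  unfold Spec_build_shout_specific_grammar
  exact build_shout_specific_grammar_spec_aux shout_name atoms hpre
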